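-- pv_equiv track=rewrite | github.com/mlzxy/arp | rlb/dataset.py | query_next_kf
-- ===== SOURCE A (Python) =====
-- def query_next_kf(f, kfs, return_index=False):
--     for i, kf in enumerate(kfs):
--         if kf > f:
--             if return_index:
--                 return i
--             else:
--                 return kf
--     raise RuntimeError("No more keyframes")
-- ===== SOURCE B (Python) =====
-- def query_next_kf(f, kfs, return_index=False):
--     candidates = [(i, kf) for i, kf in enumerate(kfs) if kf > f]
--     if not candidates:
--         raise RuntimeError("No more keyframes")
--     i, kf = candidates[0]
--     return i if return_index else kf
-- ===== Notes on version B (the rewrite author's own statement) =====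
-- stated objective: alternative
-- what changed: Replaces the explicit scan with early return by a comprehension that collects all keyframes beyond f and then takes the first; Pre_ excludes inputs with no keyframe greater than f, where both raise RuntimeError.
import Mathlib
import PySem

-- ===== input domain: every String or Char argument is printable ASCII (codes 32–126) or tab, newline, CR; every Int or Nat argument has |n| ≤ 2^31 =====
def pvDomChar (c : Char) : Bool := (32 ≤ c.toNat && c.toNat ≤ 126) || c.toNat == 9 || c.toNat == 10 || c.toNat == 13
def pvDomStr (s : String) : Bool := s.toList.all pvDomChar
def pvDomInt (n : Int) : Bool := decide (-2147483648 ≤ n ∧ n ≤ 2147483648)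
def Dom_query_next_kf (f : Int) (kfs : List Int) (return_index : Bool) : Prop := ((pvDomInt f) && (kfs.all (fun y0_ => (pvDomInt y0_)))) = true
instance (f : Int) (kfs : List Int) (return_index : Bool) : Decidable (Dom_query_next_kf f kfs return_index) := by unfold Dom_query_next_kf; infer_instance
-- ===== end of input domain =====

-- B builds the list of (index, keyframe) pairs beyond f with a comprehension and takes the
-- first, instead of A's scan with early return (objective: alternative; return value only).

-- ===== PORT A =====
-- for i, kf in enumerate(kfs): if kf > f: return i / kf ; falling through = RuntimeError (none)
def queryA_loop (f : Int) (return_index : Bool) : List (Int × Int) → Option Int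
  | [] => none
  | (i, kf) :: rest =>
    if kf > f then (if return_index then some i else some kf)
    else queryA_loop f return_index rest

def query_next_kf (f : Int) (kfs : List Int) (return_index : Bool) : Int :=
  match queryA_loop f return_index (PySem.List.enumerate kfs) with
  | some v => v
  | none => 0   -- Python raises RuntimeError here; excluded by Pre_query_next_kf

-- ===== PORT B =====
-- candidates = [(i, kf) for i, kf in enumerate(kfs) if kf > f]; first element projected
def query_next_kf_alt (f : Int) (kfs : List Int) (return_index : Bool) : Int :=
  let candidates := (PySem.List.enumerate kfs).filter (fun p => decide (p.2 > f))
  match candidates with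
  | (i, kf) :: _ => if return_index then i else kf
  | [] => 0   -- Python raises RuntimeError here; excluded by Pre_query_next_kf

-- ===== PRECONDITION & SPEC =====
-- Pre_ excludes exactly the inputs where no keyframe exceeds f: there Python A (and B) raise RuntimeError.
def Pre_query_next_kf (f : Int) (kfs : List Int) (return_index : Bool) : Prop :=
  ∃ kf ∈ kfs, f < kf
instance (f : Int) (kfs : List Int) (return_index : Bool) : Decidable (Pre_query_next_kf f kfs return_index) := by unfold Pre_query_next_kf; infer_instance
def pvWitness_query_next_kf : Int × List Int × Bool := (3, [1, 5, 2], false)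

def Spec_query_next_kf (f : Int) (kfs : List Int) (return_index : Bool) (out : Int) : Prop := out = query_next_kf_alt f kfs return_index
instance (f : Int) (kfs : List Int) (return_index : Bool) (out : Int) : Decidable (Spec_query_next_kf f kfs return_index out) := by unfold Spec_query_next_kf; infer_instance

-- ===== CLAIM (what is proved, stated in full; the proofs are below) =====
def Claim_equal_query_next_kf : Prop := ∀ (f : Int) (kfs : List Int) (return_index : Bool), Dom_query_next_kf f kfs return_index → Pre_query_next_kf f kfs return_index → Spec_query_next_kf f kfs return_index (query_next_kf f kfs return_index)

-- ===== LEMMAS AND PROOFS =====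

-- A's first-match loop agrees with projecting the head of the filtered list.
lemma queryA_loop_eq_filter (f : Int) (ri : Bool) (l : List (Int × Int)) :
    queryA_loop f ri l
      = ((l.filter (fun p => decide (p.2 > f))).head?).map
          (fun p => if ri then p.1 else p.2) := by
  induction l with
  | nil => rfl
  | cons p rest ih =>
    obtain ⟨i, kf⟩ := p
    by_cases h : kf > f <;> simp [queryA_loop, List.filter_cons, h, ih] <;> split <;> rfl

lemma ports_agree (f : Int) (kfs : List Int) (ri : Bool) :
    query_next_kf f kfs ri = query_next_kf_alt f kfs ri := by
  unfold query_next_kf query_next_kf_alt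
  rw [queryA_loop_eq_filter]
  cases (PySem.List.enumerate kfs).filter (fun p => decide (p.2 > f)) <;> rfl

-- ===== VERDICT (by name: the statement is the Claim_ definition above) =====
theorem query_next_kf_spec : Claim_equal_query_next_kf := by
  intro f kfs ri _ _
  unfold Spec_query_next_kf
  exact ports_agree f kfs ri
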